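-- pv_equiv track=rewrite | github.com/airbytehq/airbyte | airbyte-integrations/connectors/source-active-directory/source_active_directory/streams/organizational_units.py | _parse_gpo_links
-- ===== SOURCE A (Python) =====
-- def _parse_gpo_links(gp_link: str) -> list:
--     """Parse Group Policy Object links."""
--     if not gp_link:
--         return []
--
--     try:
--         # GPO links are stored as [LDAP://CN=GUID,CN=Policies,CN=System,DC=...;OPTIONS]
--         gpo_links = []
--         parts = gp_link.split('[')
--         for part in parts[1:]:  # Skip first empty part
--             if ';' in part:
--                 gpo_dn = part.split(';')[0]
--                 if gpo_dn.startswith('LDAP://'):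
--                     gpo_dn = gpo_dn[7:]  # Remove LDAP:// prefix
--                 gpo_links.append(gpo_dn)
--         return gpo_links
--     except Exception:
--         return []
-- ===== SOURCE B (Python) =====
-- def _parse_gpo_links(gp_link: str) -> list:
--     """Parse Group Policy Object links (single-pass character state machine)."""
--     links = []
--     buf = None  # chars of the current '['-opened segment; None when not capturing
--     for ch in gp_link:
--         if ch == '[':
--             buf = []
--         elif buf is not None:
--             if ch == ';':
--                 dn = ''.join(buf)
--                 if dn.startswith('LDAP://'):
--                     dn = dn[7:]
--                 links.append(dn)
--                 buf = None
--             else: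
--                 buf.append(ch)
--     return links
-- ===== Notes on version B (the rewrite author's own statement) =====
-- stated objective: alternative
-- what changed: Replaced the split-based two-pass parsing (split on the opening bracket, then per part a semicolon split plus prefix strip) with a single left-to-right character state machine that starts capturing at each opening bracket and emits the captured DN, LDAP prefix stripped, at the first semicolon; the truthiness guard and try/except disappear.
import Mathlib
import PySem

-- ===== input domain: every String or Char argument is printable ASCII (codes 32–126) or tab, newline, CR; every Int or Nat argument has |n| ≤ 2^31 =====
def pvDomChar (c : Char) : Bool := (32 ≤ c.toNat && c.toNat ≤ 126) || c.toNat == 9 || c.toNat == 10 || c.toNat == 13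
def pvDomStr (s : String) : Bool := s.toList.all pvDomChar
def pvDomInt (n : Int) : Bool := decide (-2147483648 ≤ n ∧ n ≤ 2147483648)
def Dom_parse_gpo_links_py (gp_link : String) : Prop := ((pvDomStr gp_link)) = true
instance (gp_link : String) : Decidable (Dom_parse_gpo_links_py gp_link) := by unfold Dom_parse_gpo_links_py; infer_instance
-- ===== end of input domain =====

-- ===== PORT A =====
-- B replaces A's split-on-'[' + per-part split(';') passes by a single character state machine (objective: alternative, same O(n) cost).
def parse_gpo_links_py (gp_link : String) : List String :=
  if gp_link == "" then []
  else
    -- parts = gp_link.split('['); the separator "[" is non-empty, so split? is some (getD [] unreachable)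
    let parts := (PySem.Str.split? gp_link "[").getD []
    (parts.drop 1).foldl (fun gpo_links part =>
      if PySem.Str.isIn ";" part then
        -- part.split(';')[0]; split of a string by a non-empty separator is never empty (headD "" unreachable)
        let gpo_dn := ((PySem.Str.split? part ";").getD []).headD ""
        let gpo_dn := if PySem.Str.startswith gpo_dn "LDAP://"
                      then PySem.Str.slice gpo_dn (some 7) none else gpo_dn
        gpo_links ++ [gpo_dn]
      else gpo_links) []

-- ===== PORT B =====
-- ''.join(buf) with the LDAP:// prefix stripped (the body of B's "ch == ';'" branch)
def pvAltFinish (b : List Char) : String :=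
  let dn := String.ofList b
  if PySem.Str.startswith dn "LDAP://" then PySem.Str.slice dn (some 7) none else dn

-- B's for-loop as structural recursion over the characters; state = (links, buf)
def pvAltGo : List Char → List String → Option (List Char) → List String
  | [], links, _ => links
  | c :: rest, links, buf =>
    if c = '[' then pvAltGo rest links (some [])
    else
      match buf with
      | none => pvAltGo rest links none
      | some b =>
        if c = ';' then pvAltGo rest (links ++ [pvAltFinish b]) none
        else pvAltGo rest links (some (b ++ [c]))

def parse_gpo_links_py_alt (gp_link : String) : List String :=
  pvAltGo gp_link.toList [] none

-- ===== PRECONDITION & SPEC =====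
def Spec_parse_gpo_links_py (gp_link : String) (out : List String) : Prop := out = parse_gpo_links_py_alt gp_link
instance (gp_link : String) (out : List String) : Decidable (Spec_parse_gpo_links_py gp_link out) := by unfold Spec_parse_gpo_links_py; infer_instance

-- ===== CLAIM (what is proved, stated in full; the proofs are below) =====
def Claim_equal_parse_gpo_links_py : Prop := ∀ (gp_link : String), Dom_parse_gpo_links_py gp_link → Spec_parse_gpo_links_py gp_link (parse_gpo_links_py gp_link)

-- ===== LEMMAS AND PROOFS =====

-- split of a char list on the single character sc, with the piece in progress as accumulator
def pvSplitC (sc : Char) : List Char → List Char → List (List Char)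
  | [], cur => [cur]
  | c :: rest, cur =>
    if c = sc then cur :: pvSplitC sc rest [] else pvSplitC sc rest (cur ++ [c])

-- the pieces strictly after the first sc
def pvTail (sc : Char) : List Char → List (List Char)
  | [] => []
  | c :: rest => if c = sc then pvSplitC sc rest [] else pvTail sc rest

-- shared processing of the bracket segments
def pvProc (links : List String) (segs : List (List Char)) : List String :=
  segs.foldl (fun acc seg =>
    if ';' ∈ seg then acc ++ [pvAltFinish (seg.takeWhile (· ≠ ';'))] else acc) links

theorem pv_go (sc : Char) (l : List Char) : ∀ (fuel : Nat), l.length ≤ fuel →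
    ∀ (cur : List Char) (acc : List (List Char)),
    PySem.Chars.splitOn.go [sc] fuel l cur acc = acc.reverse ++ pvSplitC sc l cur.reverse := by
  induction l with
  | nil =>
    intro fuel _ cur acc
    cases fuel with
    | zero => rw [PySem.Chars.splitOn.go]; simp [pvSplitC]
    | succ f => rw [PySem.Chars.splitOn.go]; simp [pvSplitC]; omega
  | cons c rest ih =>
    intro fuel hf cur acc
    cases fuel with
    | zero => simp at hf
    | succ f =>
      rw [PySem.Chars.splitOn.go]
      have hf' : rest.length ≤ f := by simpa using hf
      by_cases hc : c = sc
      · subst hc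
        simp only [List.isPrefixOf, beq_self_eq_true, Bool.true_and, if_true]
        rw [show List.drop [c].length (c :: rest) = rest by simp]
        rw [ih f hf' [] (cur.reverse :: acc)]
        simp [pvSplitC]
      · have : [sc].isPrefixOf (c :: rest) = false := by
          simp [List.isPrefixOf]; exact fun h => absurd h.symm hc
        rw [this]
        simp only [if_false, Bool.false_eq_true]
        rw [ih f hf' (c :: cur) acc]
        simp [pvSplitC, hc]

theorem pv_splitOn (sc : Char) (l : List Char) :
    PySem.Chars.splitOn l [sc] = pvSplitC sc l [] := by
  have := pv_go sc l (l.length + 1) (by omega) [] []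
  simpa [PySem.Chars.splitOn] using this

-- head/tail structure of pvSplitC
theorem pv_splitC_struct (sc : Char) (l : List Char) : ∀ (cur : List Char),
    pvSplitC sc l cur = (cur ++ l.takeWhile (· ≠ sc)) :: pvTail sc l := by
  induction l with
  | nil => intro cur; simp [pvSplitC, pvTail]
  | cons c rest ih =>
    intro cur
    by_cases hc : c = sc
    · subst hc; simp [pvSplitC, pvTail]
    · simp [pvSplitC, pvTail, hc, ih]

theorem pv_takeWhile_append (p : Char → Bool) (b u : List Char) (hb : ∀ x ∈ b, p x) :
    (b ++ u).takeWhile p = b ++ u.takeWhile p := by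
  induction b with
  | nil => simp
  | cons x xs ih =>
    simp only [List.cons_append, List.takeWhile_cons, hb x (by simp)]
    simp [ih (fun y hy => hb y (by simp [hy]))]

theorem pv_isIn_singleton (c : Char) (l : List Char) :
    PySem.Chars.isIn [c] l = true ↔ c ∈ l := by
  rw [PySem.Chars.isIn_iff_infix, List.singleton_infix_iff]

-- B's scan computes pvProc of the '['-split segments
theorem pv_alt_joint (l : List Char) :
    (∀ (links : List String) (b : List Char), ';' ∉ b →
        pvAltGo l links (some b) = pvProc links (pvSplitC '[' l b)) ∧
    (∀ (links : List String), pvAltGo l links none = pvProc links (pvTail '[' l)) := by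
  induction l with
  | nil =>
    constructor
    · intro links b hb; simp [pvAltGo, pvSplitC, pvProc, hb]
    · intro links; simp [pvAltGo, pvTail, pvProc]
  | cons c rest ih =>
    constructor
    · intro links b hb
      by_cases hbr : c = '['
      · subst hbr
        simp only [pvAltGo, if_true, pvSplitC]
        rw [ih.1 links [] (by simp)]
        simp [pvProc, hb]
      · by_cases hsc : c = ';'
        · subst hsc
          simp only [pvAltGo, hbr, if_false, if_true]
          rw [ih.2 (links ++ [pvAltFinish b])]
          have hstep : pvSplitC '[' (';' :: rest) b
              = (b ++ [';'] ++ rest.takeWhile (· ≠ '[')) :: pvTail '[' rest := by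
            simp only [pvSplitC, hbr, if_false]
            rw [pv_splitC_struct]
          rw [hstep]
          simp only [pvProc, List.foldl_cons]
          have hmem : ';' ∈ b ++ [';'] ++ rest.takeWhile (· ≠ '[') := by simp
          rw [if_pos hmem]
          have htw : (b ++ [';'] ++ rest.takeWhile (· ≠ '[')).takeWhile (· ≠ ';') = b := by
            rw [List.append_assoc, pv_takeWhile_append _ b _ (by
              intro x hx; simp; exact fun h => hb (h ▸ hx))]
            simp
          rw [htw]
        · simp only [pvAltGo, hbr, hsc, if_false]
          rw [ih.1 links (b ++ [c]) (by
            intro h; rcases List.mem_append.mp h with h | h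
            · exact hb h
            · simp at h; exact hsc h.symm)]
          simp [pvSplitC, hbr]
    · intro links
      by_cases hbr : c = '['
      · subst hbr
        simp only [pvAltGo, if_true, pvTail]
        exact ih.1 links [] (by simp)
      · simp only [pvAltGo, pvTail, hbr, if_false]
        exact ih.2 links

-- one A-loop step equals one pvProc step, given part.toList = seg
theorem pv_partStep (part : String) (seg : List Char) (hseg : part.toList = seg)
    (links : List String) :
    (if PySem.Str.isIn ";" part then
        links ++ [let gpo_dn := ((PySem.Str.split? part ";").getD []).headD "";
                  if PySem.Str.startswith gpo_dn "LDAP://"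
                  then PySem.Str.slice gpo_dn (some 7) none else gpo_dn]
      else links)
    = (if ';' ∈ seg then links ++ [pvAltFinish (seg.takeWhile (· ≠ ';'))] else links) := by
  have hin : PySem.Str.isIn ";" part = true ↔ ';' ∈ seg := by
    rw [PySem.Str.isIn_eq]
    have : (";" : String).toList = [';'] := by decide
    rw [this, hseg, pv_isIn_singleton]
  by_cases hmem : ';' ∈ seg
  · rw [if_pos hmem, if_pos (hin.mpr hmem)]
    -- identify the head of part.split(';') with seg.takeWhile (· ≠ ';')
    have hsplit := PySem.Str.split?_map part ";"
    have hne : (";" : String).toList = [';'] := by decide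
    rw [hne, PySem.Chars.split?] at hsplit
    simp only [List.isEmpty_cons] at hsplit
    rw [hseg, pv_splitOn] at hsplit
    obtain ⟨ps, hps, hmap⟩ : ∃ ps, PySem.Str.split? part ";" = some ps ∧
        ps.map String.toList = pvSplitC ';' seg [] := by
      cases h : PySem.Str.split? part ";" with
      | none => rw [h] at hsplit; simp at hsplit
      | some ps => rw [h] at hsplit; simp at hsplit; exact ⟨ps, rfl, hsplit⟩
    rw [hps]
    rw [pv_splitC_struct] at hmap
    have hdn : ((some ps).getD []).headD "" = String.ofList (seg.takeWhile (· ≠ ';')) := by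
      cases ps with
      | nil => simp at hmap
      | cons p rest =>
        simp only [List.map_cons, List.cons.injEq] at hmap
        simp only [Option.getD_some, List.headD_cons]
        apply String.toList_inj.mp
        simp [hmap.1]
    rw [hdn]
    simp [pvAltFinish]
  · rw [if_neg hmem]
    rw [if_neg (fun h => hmem (hin.mp h))]

theorem pv_foldA (parts : List String) : ∀ (links : List String),
    parts.foldl (fun gpo_links part =>
      if PySem.Str.isIn ";" part then
        gpo_links ++ [let gpo_dn := ((PySem.Str.split? part ";").getD []).headD "";
                      if PySem.Str.startswith gpo_dn "LDAP://"
                      then PySem.Str.slice gpo_dn (some 7) none else gpo_dn]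
      else gpo_links) links
    = pvProc links (parts.map String.toList) := by
  induction parts with
  | nil => intro links; simp [pvProc]
  | cons p rest ih =>
    intro links
    simp only [List.foldl_cons, List.map_cons, pvProc, List.foldl_cons]
    rw [pv_partStep p p.toList rfl links]
    exact ih _

-- pvTail is the drop-1 of pvSplitC from the empty accumulator
theorem pv_drop_splitC (sc : Char) (l : List Char) :
    (pvSplitC sc l []).drop 1 = pvTail sc l := by
  rw [pv_splitC_struct]; simp

-- ===== VERDICT (by name: the statement is the Claim_ definition above) =====
theorem parse_gpo_links_py_spec : Claim_equal_parse_gpo_links_py := by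
  intro gp_link _
  unfold Spec_parse_gpo_links_py parse_gpo_links_py parse_gpo_links_py_alt
  by_cases hempty : gp_link = ""
  · subst hempty
    simp [pvAltGo]
  · rw [if_neg (by simpa using hempty)]
    have hB := (pv_alt_joint gp_link.toList).2 []
    rw [show pvAltGo gp_link.toList [] none = pvProc [] (pvTail '[' gp_link.toList) from hB]
    -- extract the parts of gp_link.split('[')
    have hsplit := PySem.Str.split?_map gp_link "["
    have hbr : ("[" : String).toList = ['['] := by decide
    rw [hbr, PySem.Chars.split?] at hsplit
    simp only [List.isEmpty_cons] at hsplit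
    rw [pv_splitOn] at hsplit
    obtain ⟨ps, hps, hmap⟩ : ∃ ps, PySem.Str.split? gp_link "[" = some ps ∧
        ps.map String.toList = pvSplitC '[' gp_link.toList [] := by
      cases h : PySem.Str.split? gp_link "[" with
      | none => rw [h] at hsplit; simp at hsplit
      | some ps => rw [h] at hsplit; simp at hsplit; exact ⟨ps, rfl, hsplit⟩
    rw [hps]
    simp only [Option.getD_some]
    rw [pv_foldA]
    congr 1
    rw [← pv_drop_splitC '[' gp_link.toList, ← hmap]
    simp
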